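-- pv_equiv track=rewrite | github.com/WangYue1998/Python-project | project9/proj09.py | validate_hashtag
-- ===== SOURCE A (Python) =====
-- import string, calendar, pylab
--
-- def validate_hashtag(s):
--     '''check the hashtag is valid or not'''
--     #if there's no hashtag in the string
--     if '#' not in s:
--         return False
--     #looking at all the punctuation in #string.punctuation
--     for ite in string.punctuation:
--         #if there's punctuation in #the string, not including #
--         if ite in s and ite != '#':
--                 return False
--     #looking at numbers 0-9
--     for i in range (0,10):
--         #if there's a number in the string
--         if str(i) in s[1]:
--                     return False
--     #if not of those things are False, return True
--     return True
-- ===== SOURCE B (Python) =====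
-- def validate_hashtag(s):
--     # single left-to-right pass: classify each character by its ASCII code,
--     # rejecting on any punctuation other than '#' and remembering whether '#' appeared
--     seen_hash = False
--     for c in s:
--         if c == '#':
--             seen_hash = True
--         else:
--             o = ord(c)
--             if 33 <= o <= 47 or 58 <= o <= 64 or 91 <= o <= 96 or 123 <= o <= 126:
--                 return False
--     if not seen_hash:
--         return False
--     return not ('0' <= s[1] <= '9')
-- ===== Notes on version B (the rewrite author's own statement) =====
-- stated objective: alternative
-- what changed: A makes a staged pass over string.punctuation (a substring search in s per punctuation mark) and a ten-iteration digit loop; B makes one left-to-right pass over s classifying each character by its ASCII code ranges with a seen-'#' flag, then tests s[1] with a single '0'<=c<='9' comparison, using no punctuation table at all.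
import Mathlib
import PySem

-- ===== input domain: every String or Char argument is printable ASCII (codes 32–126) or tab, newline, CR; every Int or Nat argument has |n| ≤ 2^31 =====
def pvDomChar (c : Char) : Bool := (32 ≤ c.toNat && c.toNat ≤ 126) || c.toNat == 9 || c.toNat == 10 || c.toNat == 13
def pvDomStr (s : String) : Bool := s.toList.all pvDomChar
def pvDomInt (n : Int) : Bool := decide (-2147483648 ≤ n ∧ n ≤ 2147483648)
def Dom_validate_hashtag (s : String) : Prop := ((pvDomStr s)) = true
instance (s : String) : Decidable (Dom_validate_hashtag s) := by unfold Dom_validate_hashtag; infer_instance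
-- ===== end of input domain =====

-- B replaces A's staged passes (a substring search in s per punctuation mark, then a ten-iteration
-- digit loop) by ONE left-to-right pass over s that classifies each character by its ASCII code
-- ranges while tracking a seen-'#' flag, then a single '0' ≤ s[1] ≤ '9' comparison (alternative).

-- string.punctuation
def pyPunctuation : List Char := "!\"#$%&'()*+,-./:;<=>?@[\\]^_`{|}~".toList

-- ===== PORT A =====
def validate_hashtag (s : String) : Bool :=
  -- if '#' not in s: return False
  if PySem.Str.isIn "#" s = false then false
  -- for ite in string.punctuation: if ite in s and ite != '#': return False
  else if pyPunctuation.any (fun ite => PySem.Str.isIn (String.ofList [ite]) s && ite != '#') then false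
  else
    -- for i in range(0,10): if str(i) in s[1]: return False   (s[1] raises IndexError when len(s) < 2)
    match PySem.Str.pyGet? s 1 with
    | none => false   -- Python raises IndexError here; excluded by Pre_validate_hashtag
    | some c =>
      if (PySem.List.pyRange 0 10 1).any
           (fun i => PySem.Chars.isIn (PySem.Int.toChars i) [c]) then false
      else true

-- ===== PORT B =====
-- 33 <= o <= 47 or 58 <= o <= 64 or 91 <= o <= 96 or 123 <= o <= 126  (o = ord(c))
def vhIsBadPunct (c : Char) : Bool :=
  (33 ≤ c.toNat && c.toNat ≤ 47) || (58 ≤ c.toNat && c.toNat ≤ 64) ||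
  (91 ≤ c.toNat && c.toNat ≤ 96) || (123 ≤ c.toNat && c.toNat ≤ 126)

-- the for-loop of B: carries the seen_hash flag; `none` = the early `return False`
def vhScan : List Char → Bool → Option Bool
  | [], seen => some seen
  | c :: rest, seen =>
    if c = '#' then vhScan rest true
    else if vhIsBadPunct c then none
    else vhScan rest seen

def validate_hashtag_alt (s : String) : Bool :=
  match vhScan s.toList false with
  | none => false                       -- early `return False` inside the loop
  | some seen =>
    if seen = false then false          -- if not seen_hash: return False
    else
      -- return not ('0' <= s[1] <= '9')   (s[1] raises IndexError when len(s) < 2)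
      match PySem.Str.pyGet? s 1 with
      | none => false                   -- IndexError; excluded by Pre_validate_hashtag
      | some c => !(('0' ≤ c) && (c ≤ '9'))

-- ===== PRECONDITION & SPEC =====
-- Pre_ excludes only s = "#", the one input on which A (and B alike) raises IndexError (s[1] on a length-1 string).
def Pre_validate_hashtag (s : String) : Prop := s ≠ "#"
instance (s : String) : Decidable (Pre_validate_hashtag s) := by unfold Pre_validate_hashtag; infer_instance
def pvWitness_validate_hashtag : String := "#tag"

def Spec_validate_hashtag (s : String) (out : Bool) : Prop := out = validate_hashtag_alt s
instance (s : String) (out : Bool) : Decidable (Spec_validate_hashtag s out) := by unfold Spec_validate_hashtag; infer_instance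

-- ===== CLAIM (what is proved, stated in full; the proofs are below) =====
def Claim_equal_validate_hashtag : Prop := ∀ (s : String), Dom_validate_hashtag s → Pre_validate_hashtag s → Spec_validate_hashtag s (validate_hashtag s)

-- ===== LEMMAS AND PROOFS =====

theorem vh_mem_iff (a : Char) (t : List Char) : PySem.Chars.isIn [a] t = true ↔ a ∈ t := by
  rw [PySem.Chars.isIn_iff_infix]; exact List.singleton_infix_iff a t

-- on ASCII, B's ord-range classification agrees with membership in string.punctuation
set_option maxRecDepth 8192 in
theorem vh_punct_char (c : Char) (h : c.toNat < 128) :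
    (c ∈ pyPunctuation) ↔ vhIsBadPunct c = true := by
  have hfin : ∀ n : Fin 128, ((Char.ofNat n.val ∈ pyPunctuation) ↔ vhIsBadPunct (Char.ofNat n.val) = true) := by decide
  have := hfin ⟨c.toNat, h⟩
  rwa [Char.ofNat_toNat c] at this

-- on ASCII, c ∈ "0123456789" iff '0' ≤ c ≤ '9'
theorem vh_digit_char (c : Char) (h : c.toNat < 128) :
    (PySem.Chars.isIn [c] "0123456789".toList = true) ↔ (('0' ≤ c) && (c ≤ '9')) = true := by
  rw [vh_mem_iff]
  have hfin : ∀ n : Fin 128, ((Char.ofNat n.val ∈ "0123456789".toList) ↔ (('0' ≤ Char.ofNat n.val) && (Char.ofNat n.val ≤ '9')) = true) := by decide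
  have := hfin ⟨c.toNat, h⟩
  rwa [Char.ofNat_toNat c] at this

theorem vh_digit_any_iff (c : Char) :
    ((PySem.List.pyRange 0 10 1).any (fun i => PySem.Chars.isIn (PySem.Int.toChars i) [c]) = true)
    ↔ (PySem.Chars.isIn [c] "0123456789".toList = true) := by
  rw [show PySem.List.pyRange 0 10 1 = [0,1,2,3,4,5,6,7,8,9] from rfl]
  rw [show "0123456789".toList = ['0','1','2','3','4','5','6','7','8','9'] from rfl]
  simp only [List.any_cons, List.any_nil, Bool.or_eq_true]
  rw [show PySem.Int.toChars 0 = ['0'] from rfl, show PySem.Int.toChars 1 = ['1'] from rfl,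
      show PySem.Int.toChars 2 = ['2'] from rfl, show PySem.Int.toChars 3 = ['3'] from rfl,
      show PySem.Int.toChars 4 = ['4'] from rfl, show PySem.Int.toChars 5 = ['5'] from rfl,
      show PySem.Int.toChars 6 = ['6'] from rfl, show PySem.Int.toChars 7 = ['7'] from rfl,
      show PySem.Int.toChars 8 = ['8'] from rfl, show PySem.Int.toChars 9 = ['9'] from rfl]
  simp only [vh_mem_iff, List.mem_cons, List.not_mem_nil, or_false]
  tauto

-- B's loop returns none exactly when some non-'#' bad-punctuation character occurs
theorem vhScan_eq_none_iff (l : List Char) (seen : Bool) :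
    vhScan l seen = none ↔ ∃ c ∈ l, c ≠ '#' ∧ vhIsBadPunct c = true := by
  induction l generalizing seen with
  | nil => simp [vhScan]
  | cons a t ih =>
    by_cases ha : a = '#'
    · subst ha; simp [vhScan, ih]
    · by_cases hb : vhIsBadPunct a = true
      · simp [vhScan, ha, hb]
      · simp only [vhScan, if_neg ha, if_neg hb, ih, List.mem_cons]
        constructor
        · rintro ⟨c, hc, h1, h2⟩; exact ⟨c, Or.inr hc, h1, h2⟩
        · rintro ⟨c, hc, h1, h2⟩
          rcases hc with rfl | hc
          · exact absurd h2 hb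
          · exact ⟨c, hc, h1, h2⟩

-- when no bad punctuation occurs, B's loop returns the seen flag updated by '#' membership
theorem vhScan_eq_some (l : List Char) (seen : Bool)
    (h : ∀ c ∈ l, c ≠ '#' → vhIsBadPunct c = false) :
    vhScan l seen = some (seen || decide ('#' ∈ l)) := by
  induction l generalizing seen with
  | nil => simp [vhScan]
  | cons a t ih =>
    by_cases ha : a = '#'
    · subst ha
      rw [show vhScan ('#' :: t) seen = vhScan t true from by simp [vhScan]]
      rw [ih true (fun c hc => h c (List.mem_cons_of_mem _ hc))]
      simp
    · have hb : vhIsBadPunct a = false := h a (List.mem_cons_self ..) ha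
      rw [show vhScan (a :: t) seen = vhScan t seen from by simp [vhScan, ha, hb]]
      rw [ih seen (fun c hc => h c (List.mem_cons_of_mem _ hc))]
      have h4 : ¬ ('#' = a) := fun h' => ha h'.symm
      simp [h4]

theorem vh_pyGet?_one (s : String) : PySem.Str.pyGet? s 1 = s.toList[1]? := by
  have h3 : s.toList.length = s.length := String.length_toList ..
  simp only [PySem.Str.pyGet?_eq, PySem.Chars.pyGet?_eq_listPyGet?, PySem.List.pyGet?, PySem.List.pyIdx?]
  by_cases h : 1 < s.length
  · simp [h]
  · simp [h]

-- ===== VERDICT (by name: the statement is the Claim_ definition above) =====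
theorem validate_hashtag_spec : Claim_equal_validate_hashtag := by
  intro s hdom hpre
  unfold Spec_validate_hashtag validate_hashtag validate_hashtag_alt
  have hdc : ∀ c ∈ s.toList, c.toNat < 128 := by
    intro c hc
    have := List.all_eq_true.mp hdom c hc
    simp [pvDomChar] at this
    omega
  by_cases h1 : '#' ∈ s.toList
  · have hin : PySem.Chars.isIn ['#'] s.toList = true := (vh_mem_iff '#' s.toList).mpr h1
    rw [if_neg (by simp [hin])]
    by_cases hbad : ∃ c ∈ s.toList, c ≠ '#' ∧ vhIsBadPunct c = true
    · -- a non-'#' punctuation char occurs: both return false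
      have hA : (pyPunctuation.any (fun ite => PySem.Str.isIn (String.ofList [ite]) s && ite != '#')) = true := by
        obtain ⟨c, hc, hne, hb⟩ := hbad
        have hmem : c ∈ pyPunctuation := (vh_punct_char c (hdc c hc)).mpr hb
        refine List.any_eq_true.mpr ⟨c, hmem, ?_⟩
        simp [hne]
        exact (vh_mem_iff c s.toList).mpr hc
      rw [if_pos hA, (vhScan_eq_none_iff s.toList false).mpr hbad]
    · -- no bad punctuation
      have hA : (pyPunctuation.any (fun ite => PySem.Str.isIn (String.ofList [ite]) s && ite != '#')) = false := by
        rw [Bool.eq_false_iff]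
        intro h
        obtain ⟨c, hmem, hc⟩ := List.any_eq_true.mp h
        simp at hc
        obtain ⟨hcin, hne⟩ := hc
        have hcin' := (vh_mem_iff c s.toList).mp (by simpa using hcin)
        exact hbad ⟨c, hcin', hne, (vh_punct_char c (hdc c hcin')).mp hmem⟩
      rw [if_neg (by rw [hA]; exact Bool.false_ne_true)]
      rw [vhScan_eq_some s.toList false (fun c hc hne => by
            by_contra h; exact hbad ⟨c, hc, hne, by simpa using h⟩)]
      have hseen : (false || decide ('#' ∈ s.toList)) = true := by simp [h1]
      rw [hseen, vh_pyGet?_one]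
      cases hg : s.toList[1]? with
      | none =>
        exfalso
        have hlen : s.toList.length ≤ 1 := List.getElem?_eq_none_iff.mp hg
        have : s.toList = ['#'] := by
          cases ht : s.toList with
          | nil => simp [ht] at h1
          | cons a l =>
            rw [ht] at hlen h1
            cases l with
            | cons b l2 => simp at hlen
            | nil => simp at h1; simp [← h1]
        exact hpre (by simpa using congrArg String.ofList this)
      | some c =>
        have hc : c ∈ s.toList := List.mem_of_getElem? hg
        by_cases hd : (PySem.List.pyRange 0 10 1).any (fun i => PySem.Chars.isIn (PySem.Int.toChars i) [c]) = true
        · have := (vh_digit_char c (hdc c hc)).mp ((vh_digit_any_iff c).mp hd)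
          simp [hd, this]
        · have h2 : PySem.Chars.isIn [c] "0123456789".toList = false := by
            rw [Bool.eq_false_iff]; intro h; exact hd ((vh_digit_any_iff c).mpr h)
          have h3 : (('0' ≤ c) && (c ≤ '9')) = false := by
            rw [Bool.eq_false_iff]; intro h
            rw [(vh_digit_char c (hdc c hc)).mpr h] at h2; exact absurd h2 (by simp)
          simp [hd, h3]
  · -- '#' ∉ s: A returns false immediately; B's loop never sets seen_hash
    have hin : PySem.Chars.isIn ['#'] s.toList = false := by
      rw [Bool.eq_false_iff]; intro h
      exact h1 ((vh_mem_iff '#' s.toList).mp h)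
    rw [if_pos (by simp [hin])]
    by_cases hbad : ∃ c ∈ s.toList, c ≠ '#' ∧ vhIsBadPunct c = true
    · rw [(vhScan_eq_none_iff s.toList false).mpr hbad]
    · rw [vhScan_eq_some s.toList false (fun c hc hne => by
            by_contra h; exact hbad ⟨c, hc, hne, by simpa using h⟩)]
      simp [h1]
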